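-- pv_equiv track=rewrite | github.com/keon/algorithms | algorithms/dp/wildcard_matching.py | splitPatternOnWildcards
-- ===== SOURCE A (Python) =====
-- def splitPatternOnWildcards(pChars: list[chr]) -> list[list[chr]]:
--     wc = 0
--     other = 0
--
--     pTokenChars = []
--     cur = []
--     for pChar in pChars:
--         if pChar == '*':
--             wc += 1
--             if len(cur) > 0:
--                 pTokenChars.append(cur)
--                 cur = []
--         else:
--             other += 1
--             cur.append(pChar)
--     if len(cur) > 0:
--         pTokenChars.append(cur)
--
--     # If pChars contained only * characters, return a single nested list with a single *
--     if len(pTokenChars) == 0 and wc > 0 and other == 0: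
--         pTokenChars.append(['*'])
--
--     return pTokenChars
-- ===== SOURCE B (Python) =====
-- def splitPatternOnWildcards(pChars: list[chr]) -> list[list[chr]]:
--     n = len(pChars)
--     parts = []
--     i = 0
--     while i < n:
--         if pChars[i] == '*':
--             i += 1
--         else:
--             j = i + 1
--             while j < n and pChars[j] != '*':
--                 j += 1
--             parts.append(pChars[i:j])
--             i = j
--     if not parts and '*' in pChars:
--         parts = [['*']]
--     return parts
-- ===== Notes on version B (the rewrite author's own statement) =====
-- stated objective: alternative
-- what changed: Replaces the single-pass accumulator loop with cur buffer and wc/other counters by a two-pointer index scan that finds each token's end and slices it out directly, and replaces the wc>0-and-other==0 test by 'parts empty and * in pChars'.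
import Mathlib
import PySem

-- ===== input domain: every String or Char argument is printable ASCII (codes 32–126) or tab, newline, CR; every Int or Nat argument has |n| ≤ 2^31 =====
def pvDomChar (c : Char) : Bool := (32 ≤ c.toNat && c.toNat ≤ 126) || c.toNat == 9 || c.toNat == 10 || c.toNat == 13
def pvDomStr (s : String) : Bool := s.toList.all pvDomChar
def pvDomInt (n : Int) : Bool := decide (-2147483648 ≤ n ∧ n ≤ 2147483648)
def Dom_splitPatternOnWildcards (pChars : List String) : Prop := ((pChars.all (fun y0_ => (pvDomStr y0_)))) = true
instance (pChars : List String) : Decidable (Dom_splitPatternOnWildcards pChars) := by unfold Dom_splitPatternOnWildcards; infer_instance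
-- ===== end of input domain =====

-- B replaces A's accumulator loop (cur buffer + wc/other counters) by a two-pointer index scan
-- slicing each token out directly; alternative decomposition, same cost.


-- ===== PORT A =====
-- A's for-loop as structural recursion over the same state (wc, other, pTokenChars, cur).
def aLoop : List String → Int → Int → List (List String) → List String →
    Int × Int × List (List String) × List String
  | [], wc, other, acc, cur => (wc, other, acc, cur)
  | c :: rest, wc, other, acc, cur =>
    if c = "*" then
      if cur.length > 0 then aLoop rest (wc + 1) other (acc ++ [cur]) []
      else aLoop rest (wc + 1) other acc cur
    else aLoop rest wc (other + 1) acc (cur ++ [c])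

def splitPatternOnWildcards (pChars : List String) : List (List String) :=
  let r := aLoop pChars 0 0 [] []
  let wc := r.1; let other := r.2.1; let pTokenChars := r.2.2.1; let cur := r.2.2.2
  let pTokenChars := if cur.length > 0 then pTokenChars ++ [cur] else pTokenChars
  if pTokenChars.length = 0 ∧ wc > 0 ∧ other = 0 then pTokenChars ++ [["*"]] else pTokenChars

-- ===== PORT B =====
-- inner while: advance j while j < n and pChars[j] != '*'  (getD only used with j < length, exact)
def bFind (pChars : List String) (j : Nat) : Nat :=
  if j < pChars.length then
    if pChars.getD j "" ≠ "*" then bFind pChars (j + 1) else j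
  else j
termination_by pChars.length - j

theorem bFind_ge (pChars : List String) (j : Nat) : j ≤ bFind pChars j := by
  unfold bFind
  split
  · split
    · exact le_trans (Nat.le_succ j) (bFind_ge pChars (j + 1))
    · exact le_refl j
  · exact le_refl j
termination_by pChars.length - j

-- outer while over index i; pChars[i:j] with 0 ≤ i ≤ j is (drop i).take (j - i), exact
def bLoop (pChars : List String) (i : Nat) (parts : List (List String)) : List (List String) :=
  if i < pChars.length then
    if pChars.getD i "" = "*" then bLoop pChars (i + 1) parts
    else
      let j := bFind pChars (i + 1)
      bLoop pChars j (parts ++ [(pChars.drop i).take (j - i)])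
  else parts
termination_by pChars.length - i
decreasing_by
  · omega
  · have h := bFind_ge pChars (i + 1); omega

def splitPatternOnWildcards_alt (pChars : List String) : List (List String) :=
  let parts := bLoop pChars 0 []
  if parts.isEmpty ∧ pChars.contains "*" then [["*"]] else parts

-- ===== PRECONDITION & SPEC =====
def Spec_splitPatternOnWildcards (pChars : List String) (out : List (List String)) : Prop := out = splitPatternOnWildcards_alt pChars
instance (pChars : List String) (out : List (List String)) : Decidable (Spec_splitPatternOnWildcards pChars out) := by unfold Spec_splitPatternOnWildcards; infer_instance

-- ===== CLAIM (what is proved, stated in full; the proofs are below) =====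
def Claim_equal_splitPatternOnWildcards : Prop := ∀ (pChars : List String), Dom_splitPatternOnWildcards pChars → Spec_splitPatternOnWildcards pChars (splitPatternOnWildcards pChars)

-- ===== LEMMAS AND PROOFS =====

-- common specification: tokens of the pattern, by structural recursion
def gtok : List String → List (List String)
  | [] => []
  | c :: rest =>
    if c = "*" then gtok rest
    else (c :: rest.takeWhile (fun x => x ≠ "*")) :: gtok (rest.dropWhile (fun x => x ≠ "*"))
termination_by l => l.length
decreasing_by
  · simp
  · have := List.length_dropWhile_le (p := fun x => !decide (x = "*")) (l := rest)
    simp only [List.length_cons]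
    simp only [ne_eq, decide_not] at *
    omega

theorem gtok_nil_all_star (l : List String) (h : gtok l = []) : ∀ c ∈ l, c = "*" := by
  induction l using gtok.induct with
  | case1 => simp
  | case2 rest ih =>
    rw [gtok, if_pos rfl] at h
    intro x hx
    rcases List.mem_cons.mp hx with h1 | h1
    · exact h1
    · exact ih h x h1
  | case3 c rest hc ih =>
    rw [gtok, if_neg hc] at h
    exact absurd h (by simp)

-- ---- A side ----
theorem aLoop_wc (l : List String) : ∀ wc other acc cur,
    (aLoop l wc other acc cur).1 = wc + (l.count "*" : Int) := by
  induction l with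
  | nil => intro wc other acc cur; simp [aLoop]
  | cons c rest ih =>
    intro wc other acc cur
    by_cases hc : c = "*"
    · by_cases hcur : cur.length > 0 <;>
        simp [aLoop, hc, hcur, ih, List.count_cons] <;> ring
    · simp [aLoop, hc, ih, List.count_cons, (by simpa using hc : ¬ (c == "*") = true)]

theorem aLoop_other (l : List String) : ∀ wc other acc cur,
    (aLoop l wc other acc cur).2.1 = other + ((l.filter (fun c => c ≠ "*")).length : Int) := by
  induction l with
  | nil => intro wc other acc cur; simp [aLoop]
  | cons c rest ih =>
    intro wc other acc cur
    by_cases hc : c = "*"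
    · by_cases hcur : cur.length > 0 <;> simp [aLoop, hc, hcur, ih, List.filter_cons]
    · simp [aLoop, hc, ih, List.filter_cons]
      ring

def finalize (r : Int × Int × List (List String) × List String) : List (List String) :=
  if r.2.2.2.length > 0 then r.2.2.1 ++ [r.2.2.2] else r.2.2.1

theorem aLoop_toks (l : List String) : ∀ wc other acc cur,
    finalize (aLoop l wc other acc cur)
      = acc ++ (if cur = [] then gtok l
                else (cur ++ l.takeWhile (fun x => x ≠ "*")) :: gtok (l.dropWhile (fun x => x ≠ "*"))) := by
  induction l with
  | nil =>
    intro wc other acc cur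
    rcases List.eq_nil_or_concat cur with h | ⟨ys, y, h⟩
    · simp [aLoop, finalize, h, gtok]
    · subst h; simp [aLoop, finalize, gtok]
  | cons c rest ih =>
    intro wc other acc cur
    by_cases hc : c = "*"
    · subst hc
      by_cases hcur : cur = []
      · subst hcur
        have hstep : aLoop ("*" :: rest) wc other acc [] = aLoop rest (wc + 1) other acc [] := by
          simp [aLoop]
        rw [hstep, ih, gtok]
        simp
      · have hlen : cur.length > 0 := List.length_pos_iff.mpr hcur
        have hstep : aLoop ("*" :: rest) wc other acc cur = aLoop rest (wc + 1) other (acc ++ [cur]) [] := by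
          simp [aLoop, hlen]
        rw [hstep, ih]
        simp [gtok, List.takeWhile_cons, List.dropWhile_cons, hcur]
    · have hstep : aLoop (c :: rest) wc other acc cur = aLoop rest wc (other + 1) acc (cur ++ [c]) := by
        simp [aLoop, hc]
      rw [hstep, ih]
      have hne : cur ++ [c] ≠ [] := by simp
      by_cases hcur : cur = []
      · subst hcur
        simp [gtok, hc, List.takeWhile_cons, List.dropWhile_cons, if_neg hne]
      · simp [gtok, hc, List.takeWhile_cons, List.dropWhile_cons, if_neg hne, hcur]

-- ---- B side ----
theorem take_len_takeWhile (p : String → Bool) (l : List String) :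
    l.take (l.takeWhile p).length = l.takeWhile p := by
  induction l with
  | nil => simp
  | cons c rest ih =>
    by_cases h : p c <;> simp [List.takeWhile_cons, h, ih]

theorem drop_len_takeWhile (p : String → Bool) (l : List String) :
    l.drop (l.takeWhile p).length = l.dropWhile p := by
  induction l with
  | nil => simp
  | cons c rest ih =>
    by_cases h : p c <;> simp [List.takeWhile_cons, List.dropWhile_cons, h, ih]

theorem getD_lt (l : List String) (i : Nat) (h : i < l.length) : l.getD i "" = l[i] := by
  simp [List.getD_eq_getElem?_getD, List.getElem?_eq_getElem h]

theorem bFind_spec (pChars : List String) (j : Nat) :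
    bFind pChars j = j + ((pChars.drop j).takeWhile (fun x => x ≠ "*")).length := by
  induction j using bFind.induct pChars with
  | case1 j hj hne ih =>
    rw [bFind, if_pos hj, if_pos hne, ih]
    rw [getD_lt pChars j hj] at hne
    have hd : decide (pChars[j] ≠ "*") = true := by simpa using hne
    rw [List.drop_eq_getElem_cons hj, List.takeWhile_cons, if_pos hd]
    simp only [List.length_cons]
    omega
  | case2 j hj hne =>
    rw [bFind, if_pos hj, if_neg hne]
    rw [getD_lt pChars j hj] at hne
    simp only [ne_eq, not_not] at hne
    have hd : ¬ (decide (pChars[j] ≠ "*") = true) := by simp [hne]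
    rw [List.drop_eq_getElem_cons hj, List.takeWhile_cons, if_neg hd]
    simp
  | case3 j hj =>
    rw [bFind, if_neg hj]
    rw [List.drop_eq_nil_iff.mpr (by omega)]
    simp

theorem bLoop_spec (pChars : List String) (i : Nat) (parts : List (List String)) :
    bLoop pChars i parts = parts ++ gtok (pChars.drop i) := by
  induction i, parts using bLoop.induct pChars with
  | case1 i parts hi hstar ih =>
    rw [bLoop, if_pos hi, if_pos hstar, ih]
    rw [List.drop_eq_getElem_cons hi, gtok]
    rw [getD_lt pChars i hi] at hstar
    rw [if_pos hstar]
  | case2 i parts hi hstar j ih =>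
    rw [bLoop, if_pos hi, if_neg hstar]
    have hjdef : j = bFind pChars (i + 1) := rfl
    · rw [show bFind pChars (i + 1) = j from rfl, ih, hjdef]
      rw [getD_lt pChars i hi] at hstar
      have hdrop : pChars.drop i = pChars[i] :: pChars.drop (i + 1) := List.drop_eq_getElem_cons hi
      have hfind := bFind_spec pChars (i + 1)
      set tw := ((pChars.drop (i + 1)).takeWhile (fun x => x ≠ "*")).length with htw
      have hsl : (pChars.drop i).take (bFind pChars (i + 1) - i)
          = pChars[i] :: (pChars.drop (i + 1)).takeWhile (fun x => x ≠ "*") := by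
        rw [hdrop, hfind]
        have : i + 1 + tw - i = tw + 1 := by omega
        rw [this, List.take_succ_cons, take_len_takeWhile]
      have hdr : pChars.drop (bFind pChars (i + 1)) = (pChars.drop (i + 1)).dropWhile (fun x => x ≠ "*") := by
        rw [hfind, ← List.drop_drop, htw, drop_len_takeWhile]
      rw [hsl, hdr]
      conv_rhs => rw [hdrop, gtok, if_neg hstar]
      simp
  | case3 i parts hi =>
    rw [bLoop, if_neg hi, List.drop_eq_nil_iff.mpr (by omega)]
    simp [gtok]

-- glue: both programs compute gtok plus the same all-star special case
theorem count_pos_iff_mem (l : List String) : (0 : Int) < (l.count "*" : Int) ↔ "*" ∈ l := by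
  have := List.count_pos_iff (a := "*") (l := l)
  constructor
  · intro h; exact this.mp (by exact_mod_cast h)
  · intro h; exact_mod_cast this.mpr h

-- ===== VERDICT (by name: the statement is the Claim_ definition above) =====
theorem splitPatternOnWildcards_spec : Claim_equal_splitPatternOnWildcards := by
  intro pChars _
  unfold Spec_splitPatternOnWildcards splitPatternOnWildcards splitPatternOnWildcards_alt
  have htoks : (if (aLoop pChars 0 0 [] []).2.2.2.length > 0
        then (aLoop pChars 0 0 [] []).2.2.1 ++ [(aLoop pChars 0 0 [] []).2.2.2]
        else (aLoop pChars 0 0 [] []).2.2.1) = gtok pChars := by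
    have := aLoop_toks pChars 0 0 [] []
    simpa [finalize] using this
  have hB : bLoop pChars 0 [] = gtok pChars := by simpa using bLoop_spec pChars 0 []
  simp only [htoks, hB]
  have hwc := aLoop_wc pChars 0 0 [] []
  have hot := aLoop_other pChars 0 0 [] []
  simp only [zero_add] at hwc hot
  by_cases hnil : gtok pChars = []
  · by_cases hmem : "*" ∈ pChars
    · have hcond : (gtok pChars).length = 0 ∧ (aLoop pChars 0 0 [] []).1 > 0 ∧ (aLoop pChars 0 0 [] []).2.1 = 0 := by
        refine ⟨by simp [hnil], ?_, ?_⟩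
        · rw [hwc]; exact (count_pos_iff_mem pChars).mpr hmem
        · rw [hot]
          have hall := gtok_nil_all_star pChars hnil
          have hfil : pChars.filter (fun c => decide (c ≠ "*")) = [] :=
            List.filter_eq_nil_iff.mpr (fun a ha => by simp [hall a ha])
          rw [hfil]
          simp
      rw [if_pos hcond, if_pos ⟨by simp [hnil], by simp [hmem]⟩, hnil]
      simp
    · have hcond : ¬ ((gtok pChars).length = 0 ∧ (aLoop pChars 0 0 [] []).1 > 0 ∧ (aLoop pChars 0 0 [] []).2.1 = 0) := by
        rintro ⟨-, h2, -⟩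
        rw [hwc] at h2
        exact hmem ((count_pos_iff_mem pChars).mp h2)
      rw [if_neg hcond, if_neg (by simp [hmem])]
  · have h1 : ¬ ((gtok pChars).length = 0 ∧ (aLoop pChars 0 0 [] []).1 > 0 ∧ (aLoop pChars 0 0 [] []).2.1 = 0) := by
      rintro ⟨h0, -, -⟩
      exact hnil (List.length_eq_zero_iff.mp h0)
    rw [if_neg h1, if_neg (by simp [hnil])]
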